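-- pv_equiv track=rewrite | github.com/vbarreau/Overflow | 02_RANS/maillage.py | get_paraph
-- ===== SOURCE A (Python) =====
-- def get_paraph(meshdat) :
--     n = None
--     f = None
--     c = None
--     for i in range(len(meshdat)):
--         if meshdat[i][0] == 'n' and n is None:
--             n = i
--         elif meshdat[i][0] == 'f' and f is None:
--             f = i
--         elif meshdat[i][0] == 'c' and c is None:
--             c = i
--     return n,f,c
-- ===== SOURCE B (Python) =====
-- def get_paraph(meshdat):
--     # two-phase: extract the table of first characters eagerly, then search it
--     firsts = [x[0] for x in meshdat]
--     def find(ch):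
--         try:
--             return firsts.index(ch)
--         except ValueError:
--             return None
--     return find('n'), find('f'), find('c')
-- ===== Notes on version B (the rewrite author's own statement) =====
-- stated objective: alternative
-- what changed: Replaces A's single fused scan with first-seen flags by a two-phase decomposition: eagerly extract the list of first characters, then find each of 'n','f','c' independently with list.index under try/except.
import Mathlib
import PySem

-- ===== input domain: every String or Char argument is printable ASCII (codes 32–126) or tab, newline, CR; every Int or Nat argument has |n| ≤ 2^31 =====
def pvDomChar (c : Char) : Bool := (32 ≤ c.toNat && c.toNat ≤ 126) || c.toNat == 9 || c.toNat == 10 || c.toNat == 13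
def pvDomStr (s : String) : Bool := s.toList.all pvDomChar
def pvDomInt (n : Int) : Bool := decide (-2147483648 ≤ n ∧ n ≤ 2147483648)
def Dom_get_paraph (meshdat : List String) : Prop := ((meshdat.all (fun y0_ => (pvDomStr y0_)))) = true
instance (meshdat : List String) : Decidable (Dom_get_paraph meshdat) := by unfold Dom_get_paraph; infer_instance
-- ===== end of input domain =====

-- B replaces A's fused flag-scan by extracting the first-character table then three independent index searches (objective: alternative decomposition).

-- ===== PORT A =====
def get_paraph (meshdat : List String) : Option Int × Option Int × Option Int :=
  (PySem.List.pyRange 0 (meshdat.length : Int) 1).foldl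
    (fun st i =>
      match PySem.List.pyGet? meshdat i with
      | none => st        -- unreachable for i in range(len(meshdat))
      | some s =>
        match PySem.Str.pyGet? s 0 with
        | none => st      -- Python raises IndexError here; excluded by Pre_
        | some ch =>
          if ch = 'n' ∧ st.1 = none then (some i, st.2.1, st.2.2)
          else if ch = 'f' ∧ st.2.1 = none then (st.1, some i, st.2.2)
          else if ch = 'c' ∧ st.2.2 = none then (st.1, st.2.1, some i)
          else st)
    (none, none, none)

-- ===== PORT B =====
-- 'find(ch)' of Source B: list.index with ValueError caught as None
def pvFind (firsts : List (Option Char)) (ch : Char) : Option Int :=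
  (PySem.List.index? firsts (some ch)).map (fun k => (k : Int))

def get_paraph_alt (meshdat : List String) : Option Int × Option Int × Option Int :=
  let firsts := meshdat.map (fun x => PySem.Str.pyGet? x 0)
  (pvFind firsts 'n', pvFind firsts 'f', pvFind firsts 'c')

-- ===== PRECONDITION & SPEC =====
-- Pre_ excludes lists containing an empty string: there Python A (and B alike) raises IndexError on x[0].
def Pre_get_paraph (meshdat : List String) : Prop := ∀ s ∈ meshdat, s ≠ ""
instance (meshdat : List String) : Decidable (Pre_get_paraph meshdat) := by unfold Pre_get_paraph; infer_instance
def pvWitness_get_paraph : List String := ["node 1 2", "xtra", "face 3", "cell 4"]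

def Spec_get_paraph (meshdat : List String) (out : Option Int × Option Int × Option Int) : Prop := out = get_paraph_alt meshdat
instance (meshdat : List String) (out : Option Int × Option Int × Option Int) : Decidable (Spec_get_paraph meshdat out) := by unfold Spec_get_paraph; infer_instance

-- ===== CLAIM (what is proved, stated in full; the proofs are below) =====
def Claim_equal_get_paraph : Prop := ∀ (meshdat : List String), Dom_get_paraph meshdat → Pre_get_paraph meshdat → Spec_get_paraph meshdat (get_paraph meshdat)

-- ===== LEMMAS AND PROOFS =====

lemma pvGet_append_left (l : List String) (s : String) (i : Int) (h0 : 0 ≤ i) (h : i < (l.length : Int)) :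
    PySem.List.pyGet? (l ++ [s]) i = PySem.List.pyGet? l i := by
  rw [PySem.List.pyGet?_of_nonneg _ h0, PySem.List.pyGet?_of_nonneg _ h0]
  have : i.toNat < l.length := by omega
  rw [List.getElem?_append_left this]

lemma pvIndex_append_single (fl : List (Option Char)) (x v : Option Char) :
    PySem.List.index? (fl ++ [x]) v =
      ((PySem.List.index? fl v).or (if x = v then some fl.length else none)) := by
  by_cases hv : v ∈ fl
  · rw [PySem.List.index?_append_of_mem _ hv]
    rcases Option.isSome_iff_exists.mp ((PySem.List.index?_isSome_iff fl v).mpr hv) with ⟨k, hk⟩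
    rw [hk, Option.some_or]
  · have hnone : PySem.List.index? fl v = none := (PySem.List.index?_eq_none_iff fl v).mpr hv
    by_cases hx : x = v
    · subst hx
      rw [PySem.List.index?_append_singleton_self _ _ hv, hnone]
      simp
    · have hmem : v ∉ fl ++ [x] := by
        intro h
        rcases List.mem_append.mp h with h | h
        · exact hv h
        · exact hx (List.mem_singleton.mp h).symm
      rw [(PySem.List.index?_eq_none_iff _ v).mpr hmem, hnone]
      simp [hx]

lemma pvFind_append (fl : List (Option Char)) (x : Option Char) (ch : Char) :
    pvFind (fl ++ [x]) ch =
      ((pvFind fl ch).or (if x = some ch then some (fl.length : Int) else none)) := by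
  unfold pvFind
  rw [pvIndex_append_single]
  rcases PySem.List.index? fl (some ch) with _ | k <;>
    by_cases hx : x = some ch <;> simp [hx, Option.or]

lemma pv_main (l : List String) : get_paraph l = get_paraph_alt l := by
  induction l using List.reverseRecOn with
  | nil => decide
  | append_singleton l s ih =>
    unfold get_paraph at ih ⊢
    have hlen : ((l ++ [s]).length : Int) = (l.length : Int) + 1 := by simp
    rw [hlen, PySem.List.pyRange_one_succ_right (by positivity), List.foldl_append]
    have hpre : (PySem.List.pyRange 0 (l.length : Int) 1).foldl
        (fun st i =>
          match PySem.List.pyGet? (l ++ [s]) i with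
          | none => st
          | some s =>
            match PySem.Str.pyGet? s 0 with
            | none => st
            | some ch =>
              if ch = 'n' ∧ st.1 = none then (some i, st.2.1, st.2.2)
              else if ch = 'f' ∧ st.2.1 = none then (st.1, some i, st.2.2)
              else if ch = 'c' ∧ st.2.2 = none then (st.1, st.2.1, some i)
              else st)
        (none, none, none)
      = (PySem.List.pyRange 0 (l.length : Int) 1).foldl
        (fun st i =>
          match PySem.List.pyGet? l i with
          | none => st
          | some s =>
            match PySem.Str.pyGet? s 0 with
            | none => st
            | some ch =>
              if ch = 'n' ∧ st.1 = none then (some i, st.2.1, st.2.2)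
              else if ch = 'f' ∧ st.2.1 = none then (st.1, some i, st.2.2)
              else if ch = 'c' ∧ st.2.2 = none then (st.1, st.2.1, some i)
              else st)
        (none, none, none) := by
      apply PySem.List.foldl_congr_mem
      intro st i hi
      rw [PySem.List.mem_pyRange_one] at hi
      rw [pvGet_append_left l s i hi.1 hi.2]
    rw [hpre, ih]
    have hget : PySem.List.pyGet? (l ++ [s]) (l.length : Int) = some s := by
      simpa using PySem.List.pyGet?_append_length l [] s
    have hB : ∀ ch : Char, pvFind ((l ++ [s]).map (fun x => PySem.Str.pyGet? x 0)) ch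
        = ((pvFind (l.map (fun x => PySem.Str.pyGet? x 0)) ch).or
           (if PySem.Str.pyGet? s 0 = some ch then some (l.length : Int) else none)) := by
      intro ch
      rw [List.map_append, List.map_singleton, pvFind_append, List.length_map]
    show _ = get_paraph_alt (l ++ [s])
    simp only [get_paraph_alt]
    rw [hB, hB, hB]
    simp only [List.foldl_cons, List.foldl_nil, hget]
    clear ih hpre hlen hget hB
    cases hc : PySem.Str.pyGet? s 0 with
    | none =>
      simp only [reduceCtorEq]
      cases pvFind (l.map (fun x => PySem.Str.pyGet? x 0)) 'n' <;>
        cases pvFind (l.map (fun x => PySem.Str.pyGet? x 0)) 'f' <;>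
          cases pvFind (l.map (fun x => PySem.Str.pyGet? x 0)) 'c' <;> simp [Option.or]
    | some ch =>
      by_cases hn : ch = 'n'
      · subst hn
        rcases h1 : pvFind (l.map (fun x => PySem.Str.pyGet? x 0)) 'n' with _ | k1 <;>
          simp [h1, Option.or_none]
      · by_cases hf : ch = 'f'
        · subst hf
          rcases h2 : pvFind (l.map (fun x => PySem.Str.pyGet? x 0)) 'f' with _ | k2 <;>
            simp [h2, Option.or_none]
        · by_cases hcc : ch = 'c'
          · subst hcc
            rcases h3 : pvFind (l.map (fun x => PySem.Str.pyGet? x 0)) 'c' with _ | k3 <;>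
              simp [h3, Option.or_none]
          · simp [hn, hf, hcc, Option.or_none]

-- ===== VERDICT (by name: the statement is the Claim_ definition above) =====
theorem get_paraph_spec : Claim_equal_get_paraph := by
  intro meshdat _ _
  unfold Spec_get_paraph
  exact pv_main meshdat
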